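-- pv_equiv track=rewrite | github.com/abhinuvpitale/micropython-wifimanager-esp8266 | wifiManager.py | get_network_from_request
-- ===== SOURCE A (Python) =====
-- def get_network_from_request(request):
--     uid=""
--     pwd=""
--     request = request.split("\r\n")
--     for line in request:
--         if len(line) > 3 and line[0:3] == "uid":
--             uid = line[4:]
--         if len(line) > 3 and line[0:3] == "pwd":
--             pwd = line[4:]
--
--
--     return(uid, pwd)
-- ===== SOURCE B (Python) =====
-- def get_network_from_request(request):
--     lines = request.split("\r\n")
--
--     def last_field(key):
--         # scan back-to-front; the first hit from the end is A's last overwrite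
--         for line in reversed(lines):
--             if len(line) > 3 and line[:3] == key:
--                 return line[4:]
--         return ""
--
--     return (last_field("uid"), last_field("pwd"))
-- ===== Notes on version B (the rewrite author's own statement) =====
-- stated objective: alternative
-- what changed: Replaces A's forward overwrite loop with two backward searches with early exit: each field is the first match scanning the reversed line list, so no accumulator is threaded through the lines.
import Mathlib
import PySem

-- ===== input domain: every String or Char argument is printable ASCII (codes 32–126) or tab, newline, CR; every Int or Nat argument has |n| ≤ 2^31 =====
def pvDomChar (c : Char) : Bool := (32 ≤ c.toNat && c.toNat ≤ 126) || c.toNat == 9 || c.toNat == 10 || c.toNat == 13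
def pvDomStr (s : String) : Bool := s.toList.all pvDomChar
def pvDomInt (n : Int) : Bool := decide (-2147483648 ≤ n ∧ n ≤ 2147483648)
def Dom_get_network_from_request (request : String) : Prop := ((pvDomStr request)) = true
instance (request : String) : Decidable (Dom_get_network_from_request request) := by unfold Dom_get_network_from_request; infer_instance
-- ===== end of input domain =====

-- ===== PORT A =====
-- B replaces A's forward overwrite loop with two backward searches with early exit (objective: alternative).
def pvStepA (st : String × String) (line : String) : String × String :=
  let st1 := if PySem.Str.len line > 3 && (PySem.Str.slice line (some 0) (some 3) == "uid")
             then (PySem.Str.slice line (some 4) none, st.2) else st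
  if PySem.Str.len line > 3 && (PySem.Str.slice line (some 0) (some 3) == "pwd")
  then (st1.1, PySem.Str.slice line (some 4) none) else st1

def get_network_from_request (request : String) : String × String :=
  ((PySem.Str.split? request "\r\n").getD []).foldl pvStepA ("", "")

-- ===== PORT B =====
-- first match while scanning the given (already reversed) line list; "" if none
def pvLastField (key : String) : List String → String
  | [] => ""
  | line :: rest =>
    if PySem.Str.len line > 3 && (PySem.Str.slice line (some 0) (some 3) == key)
    then PySem.Str.slice line (some 4) none
    else pvLastField key rest

def get_network_from_request_alt (request : String) : String × String :=
  let lines := (PySem.Str.split? request "\r\n").getD []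
  (pvLastField "uid" lines.reverse, pvLastField "pwd" lines.reverse)

-- ===== PRECONDITION & SPEC =====
def Spec_get_network_from_request (request : String) (out : String × String) : Prop := out = get_network_from_request_alt request
instance (request : String) (out : String × String) : Decidable (Spec_get_network_from_request request out) := by unfold Spec_get_network_from_request; infer_instance

-- ===== CLAIM (what is proved, stated in full; the proofs are below) =====
def Claim_equal_get_network_from_request : Prop := ∀ (request : String), Dom_get_network_from_request request → Spec_get_network_from_request request (get_network_from_request request)

-- ===== LEMMAS AND PROOFS =====
-- pvLastField with an arbitrary default carried for the induction
def pvLastFieldD (key : String) (l : List String) (d : String) : String :=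
  match l with
  | [] => d
  | line :: rest =>
    if PySem.Str.len line > 3 && (PySem.Str.slice line (some 0) (some 3) == key)
    then PySem.Str.slice line (some 4) none
    else pvLastFieldD key rest d

theorem pvLastField_eq_D (key : String) (l : List String) :
    pvLastField key l = pvLastFieldD key l "" := by
  induction l with
  | nil => rfl
  | cons x xs ih => simp only [pvLastField, pvLastFieldD]; split <;> simp [ih]

theorem pvLastFieldD_append (key : String) (xs ys : List String) (d : String) :
    pvLastFieldD key (xs ++ ys) d = pvLastFieldD key xs (pvLastFieldD key ys d) := by
  induction xs with
  | nil => rfl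
  | cons x xs ih => simp only [List.cons_append, pvLastFieldD]; split <;> simp [ih]

-- Loop invariant: A's fold over lines equals backward first-match with the accumulator as default.
theorem pv_loop (lines : List String) (u p : String) :
    lines.foldl pvStepA (u, p)
      = (pvLastFieldD "uid" lines.reverse u, pvLastFieldD "pwd" lines.reverse p) := by
  induction lines generalizing u p with
  | nil => rfl
  | cons line rest ih =>
    simp only [List.foldl_cons, List.reverse_cons, pvLastFieldD_append]
    have hstep : pvStepA (u, p) line
        = (pvLastFieldD "uid" [line] u, pvLastFieldD "pwd" [line] p) := by
      by_cases hu : 3 < line.length ∧ PySem.Str.slice line (some 0) (some 3) = "uid"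
      · have hp : ¬ (3 < line.length ∧ PySem.Str.slice line (some 0) (some 3) = "pwd") := by
          rintro ⟨-, h2⟩; rw [hu.2] at h2; exact absurd h2 (by decide)
        simp [pvStepA, pvLastFieldD, hu, hp]
      · by_cases hp : 3 < line.length ∧ PySem.Str.slice line (some 0) (some 3) = "pwd"
        · simp [pvStepA, pvLastFieldD, hu, hp]
        · simp [pvStepA, pvLastFieldD, hu, hp]
    rw [hstep, ih]

-- ===== VERDICT (by name: the statement is the Claim_ definition above) =====
theorem get_network_from_request_spec : Claim_equal_get_network_from_request := by
  intro request _
  unfold Spec_get_network_from_request get_network_from_request get_network_from_request_alt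
  rw [pv_loop]
  simp [pvLastField_eq_D]
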